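-- pv_equiv track=rewrite | github.com/LaienSicet/Warhammer-dice | waha_1.py | d3
-- ===== SOURCE A (Python) =====
-- def d3(a):
--     s = 0
--     for i in a:
--         if i == 1 or i == 2:
--             s += 1
--         elif i == 3 or i == 4:
--             s += 2
--         elif i == 5 or i == 6:
--             s += 3
--     return s
-- ===== SOURCE B (Python) =====
-- from collections import Counter
--
-- def d3(a):
--     # Frequency table once, then sum over distinct values weighted by multiplicity.
--     return sum(((v + 1) // 2) * c for v, c in Counter(a).items() if 1 <= v <= 6)
-- ===== Notes on version B (the rewrite author's own statement) =====
-- stated objective: alternative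
-- what changed: B replaces A's per-element if/elif branch chain with a Counter frequency table summed over distinct (value, count) pairs using the closed-form mapping ((v+1)//2)*count with a 1..6 range guard.
import Mathlib
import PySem

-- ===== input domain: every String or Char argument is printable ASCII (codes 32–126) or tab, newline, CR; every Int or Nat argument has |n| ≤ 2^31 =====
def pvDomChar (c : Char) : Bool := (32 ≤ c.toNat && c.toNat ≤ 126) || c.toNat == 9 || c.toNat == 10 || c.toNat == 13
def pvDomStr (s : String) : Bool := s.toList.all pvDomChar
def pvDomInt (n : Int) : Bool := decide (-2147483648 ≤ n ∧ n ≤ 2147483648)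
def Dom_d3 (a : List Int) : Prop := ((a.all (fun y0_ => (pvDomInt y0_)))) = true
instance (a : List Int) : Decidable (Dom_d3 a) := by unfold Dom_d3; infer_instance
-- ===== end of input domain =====

-- B replaces A's per-element if/elif branch chain with a Counter frequency table
-- summed over distinct (value, count) pairs via the formula ((v+1)//2)*count (alternative decomposition, same cost).

-- ===== PORT A =====
def d3 (a : List Int) : Int :=
  a.foldl (fun s i =>
    if i = 1 ∨ i = 2 then s + 1
    else if i = 3 ∨ i = 4 then s + 2
    else if i = 5 ∨ i = 6 then s + 3
    else s) 0

-- ===== PORT B =====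
def d3_alt (a : List Int) : Int :=
  ((PySem.Dict.counter a).items.map (fun p =>
    if 1 ≤ p.1 ∧ p.1 ≤ 6 then (PySem.Int.floordiv (p.1 + 1) 2) * p.2 else 0)).sum

-- ===== PRECONDITION & SPEC =====
def Spec_d3 (a : List Int) (out : Int) : Prop := out = d3_alt a
instance (a : List Int) (out : Int) : Decidable (Spec_d3 a out) := by unfold Spec_d3; infer_instance

-- ===== CLAIM (what is proved, stated in full; the proofs are below) =====
def Claim_equal_d3 : Prop := ∀ (a : List Int), Dom_d3 a → Spec_d3 a (d3 a)

-- ===== LEMMAS AND PROOFS =====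

-- the per-element value A adds
def pvG (i : Int) : Int :=
  if i = 1 ∨ i = 2 then 1
  else if i = 3 ∨ i = 4 then 2
  else if i = 5 ∨ i = 6 then 3
  else 0

lemma pvG_eq (i : Int) :
    pvG i = (if 1 ≤ i ∧ i ≤ 6 then (PySem.Int.floordiv (i + 1) 2) else 0) := by
  unfold pvG
  split_ifs with h1 h2 h3 h4 h5 h6 h7 <;>
    first
    | (rcases ‹_ ∨ _› with rfl | rfl <;> decide)
    | omega

lemma sum_map_add (S : List Int) (f g : Int → Int) :
    (S.map (fun k => f k + g k)).sum = (S.map f).sum + (S.map g).sum := by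
  induction S with
  | nil => simp
  | cons x S ih => simp [ih]; ring

lemma sum_map_ite (S : List Int) (hS : S.Nodup) (x : Int) (c : Int) (hx : x ∈ S) :
    (S.map (fun k => if k = x then c else 0)).sum = c := by
  induction S with
  | nil => cases hx
  | cons y S ih =>
    by_cases h : y = x
    · subst h
      have hz : ∀ k ∈ S, (if k = y then c else (0:Int)) = 0 := by
        intro k hk
        have : k ≠ y := fun h => (List.nodup_cons.mp hS).1 (h ▸ hk)
        simp [this]
      simp [List.map_congr_left hz]
    · have hmem : x ∈ S := by
        rcases List.mem_cons.mp hx with rfl | hm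
        · exact absurd rfl h
        · exact hm
      simp [h, ih (List.nodup_cons.mp hS).2 hmem]

lemma sum_counts (S : List Int) (hS : S.Nodup) (l : List Int)
    (hl : ∀ x ∈ l, x ∈ S) (f : Int → Int) :
    (S.map (fun k => f k * (l.count k : Int))).sum = (l.map f).sum := by
  induction l with
  | nil => simp
  | cons x l ih =>
    have hsub : ∀ y ∈ l, y ∈ S := fun y hy => hl y (List.mem_cons_of_mem _ hy)
    have hx : x ∈ S := hl x List.mem_cons_self
    have hstep : ∀ k ∈ S,
        f k * (((x :: l).count k : Nat) : Int)
          = f k * (l.count k : Int) + (if k = x then f x else 0) := by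
      intro k _
      by_cases hkx : k = x
      · subst hkx; simp [List.count_cons_self]; ring
      · rw [List.count_cons]; simp [hkx]
        exact Or.inl (fun h => hkx h.symm)
    rw [List.map_congr_left hstep, sum_map_add, ih hsub, sum_map_ite S hS x (f x) hx]
    simp [add_comm]

lemma d3_as_sum (a : List Int) : d3 a = (a.map pvG).sum := by
  have h : ∀ s i, (if i = 1 ∨ i = 2 then s + 1
      else if i = 3 ∨ i = 4 then s + 2
      else if i = 5 ∨ i = 6 then s + 3
      else s) = s + pvG i := by
    intro s i; unfold pvG; split_ifs <;> simp
  unfold d3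
  rw [show (fun s i =>
      if i = 1 ∨ i = 2 then s + 1
      else if i = 3 ∨ i = 4 then s + 2
      else if i = 5 ∨ i = 6 then s + 3
      else s) = (fun s i => s + pvG i) from funext fun s => funext fun i => h s i]
  rw [PySem.List.foldl_add]
  simp

-- ===== VERDICT (by name: the statement is the Claim_ definition above) =====
theorem d3_spec : Claim_equal_d3 := by
  intro a _
  unfold Spec_d3 d3_alt
  rw [PySem.Dict.items_counter, d3_as_sum, List.map_map]
  have hmap : ∀ k ∈ PySem.Set.ofList a,
      ((fun p : Int × Int => if 1 ≤ p.1 ∧ p.1 ≤ 6 then (PySem.Int.floordiv (p.1 + 1) 2) * p.2 else 0)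
        ∘ (fun k => (k, (a.count k : Int)))) k
        = (fun k => pvG k * (a.count k : Int)) k := by
    intro k _
    simp only [Function.comp, pvG_eq]
    split_ifs <;> simp
  rw [List.map_congr_left hmap,
    sum_counts _ (PySem.Set.nodup_ofList a) a (fun x hx => (PySem.Set.mem_ofList a x).mpr hx) pvG]
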